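-- pv_equiv track=rewrite | github.com/huikinglam02gmail/Leetcode_solutions | 3638.maximum-balanced-shipments.py | maxBalancedShipments
-- ===== SOURCE A (Python) =====
-- from typing import List
--
-- def maxBalancedShipments(weight: List[int]) -> int:
--     result = 0
--     stack = []
--     for w in weight:
--         if stack and stack[-1] > w:
--             stack.clear()
--             result += 1
--         else: stack.append(w)
--     return result
-- ===== SOURCE B (Python) =====
-- from typing import List
--
-- def maxBalancedShipments(weight: List[int]) -> int:
--     # Two stages: (1) compute the list of adjacent-descent flags;
--     # (2) for each maximal run of consecutive descents of length m, the
--     # greedy stack scan makes exactly ceil(m/2) shipments, so sum that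
--     # closed formula over the runs.
--     descents = [a > b for a, b in zip(weight, weight[1:])]
--     total = 0
--     i = 0
--     n = len(descents)
--     while i < n:
--         k = i
--         while k < n and descents[k]:
--             k += 1
--         total += (k - i + 1) // 2
--         i = k + 1
--     return total
-- ===== Notes on version B (the rewrite author's own statement) =====
-- stated objective: alternative
-- what changed: Replaces the greedy stack state machine with a two-stage computation: build the adjacent-descent flag list, then sum the closed formula ceil(m/2) over the lengths m of its maximal runs of consecutive descents.
import Mathlib
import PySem

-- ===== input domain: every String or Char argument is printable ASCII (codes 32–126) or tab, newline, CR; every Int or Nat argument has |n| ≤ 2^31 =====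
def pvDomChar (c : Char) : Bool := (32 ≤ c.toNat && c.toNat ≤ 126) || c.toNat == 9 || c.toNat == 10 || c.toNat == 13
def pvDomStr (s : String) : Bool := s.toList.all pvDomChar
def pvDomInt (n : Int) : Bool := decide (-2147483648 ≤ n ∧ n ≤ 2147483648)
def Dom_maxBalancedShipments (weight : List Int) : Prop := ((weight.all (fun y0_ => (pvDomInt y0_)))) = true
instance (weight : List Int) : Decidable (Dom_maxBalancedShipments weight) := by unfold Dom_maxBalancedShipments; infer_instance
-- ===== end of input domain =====

-- B replaces A's greedy stack scan with a two-stage computation: descent flags, then the closed formula ceil(m/2) summed over maximal descent runs (alternative structure, same O(n) cost).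


-- ===== PORT A =====
-- A's loop: state (result, stack); "if stack and stack[-1] > w: stack.clear(); result += 1 else: stack.append(w)"
def pvLoopA : Int → List Int → List Int → Int
  | r, _, [] => r
  | r, stack, w :: rest =>
    match stack.getLast? with
    | some t => if t > w then pvLoopA (r + 1) [] rest else pvLoopA r (stack ++ [w]) rest
    | none => pvLoopA r (stack ++ [w]) rest

def maxBalancedShipments (weight : List Int) : Int := pvLoopA 0 [] weight

-- ===== PORT B =====
-- B's outer while loop over the descent-flag list: the index pair (i, k) becomes the
-- current suffix; the inner "while k < n and descents[k]: k += 1" is the length of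
-- that suffix's leading true-run (takeWhile), and "i = k + 1" is drop (k + 1).
def pvRunLoop (ds : List Bool) : Int :=
  match ds with
  | [] => 0
  | d :: rest =>
    let k := ((d :: rest).takeWhile (fun b => b)).length
    PySem.Int.floordiv ((k : Int) + 1) 2 + pvRunLoop ((d :: rest).drop (k + 1))
termination_by ds.length
decreasing_by simp [List.length_drop]

-- "descents = [a > b for a, b in zip(weight, weight[1:])]" (weight[1:] = drop 1)
def maxBalancedShipments_alt (weight : List Int) : Int :=
  pvRunLoop ((weight.zip (weight.drop 1)).map (fun p => decide (p.1 > p.2)))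

-- ===== PRECONDITION & SPEC =====
def Spec_maxBalancedShipments (weight : List Int) (out : Int) : Prop := out = maxBalancedShipments_alt weight
instance (weight : List Int) (out : Int) : Decidable (Spec_maxBalancedShipments weight out) := by unfold Spec_maxBalancedShipments; infer_instance

-- ===== CLAIM (what is proved, stated in full; the proofs are below) =====
def Claim_equal_maxBalancedShipments : Prop := ∀ (weight : List Int), Dom_maxBalancedShipments weight → Spec_maxBalancedShipments weight (maxBalancedShipments weight)

-- ===== LEMMAS AND PROOFS =====

-- Bridge function: the greedy pair-skipping recurrence that characterises A's result.
def pvGoB : List Int → Int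
  | a :: b :: rest => if a > b then 1 + pvGoB rest else pvGoB (b :: rest)
  | _ => 0

-- A's loop only sees the stack through its last element (and emptiness).
theorem pvLoopA_congr (l : List Int) : ∀ (r : Int) (s1 s2 : List Int),
    s1.getLast? = s2.getLast? → pvLoopA r s1 l = pvLoopA r s2 l := by
  induction l with
  | nil => intro r s1 s2 _; rfl
  | cons w rest ih =>
    intro r s1 s2 h
    simp only [pvLoopA, h]
    cases hs : s2.getLast? with
    | none => exact ih r (s1 ++ [w]) (s2 ++ [w]) (by simp [List.getLast?_append])
    | some t =>
      by_cases htw : t > w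
      · simp [htw]
      · simp only [if_neg htw]
        exact ih r (s1 ++ [w]) (s2 ++ [w]) (by simp [List.getLast?_append])

-- Main invariant for A: from an empty stack A computes pvGoB l; with top p it computes pvGoB (p :: l).
theorem pvLoopA_goB (l : List Int) : ∀ (r : Int),
    (pvLoopA r [] l = r + pvGoB l) ∧ ∀ p, pvLoopA r [p] l = r + pvGoB (p :: l) := by
  induction l with
  | nil => intro r; simp [pvLoopA, pvGoB]
  | cons w rest ih =>
    intro r
    constructor
    · simpa [pvLoopA] using (ih r).2 w
    · intro p
      simp only [pvLoopA, List.getLast?, List.getLast_singleton]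
      by_cases hpw : p > w
      · simp only [if_pos hpw]
        rw [(ih (r + 1)).1]
        simp [pvGoB, hpw]
        ring
      · simp only [if_neg hpw]
        rw [pvLoopA_congr rest r ([p] ++ [w]) [w] (by simp)]
        rw [(ih r).2 w]
        simp [pvGoB, hpw]

-- Unfolding lemmas for pvRunLoop.
theorem pvRunLoop_nil : pvRunLoop [] = 0 := by
  rw [pvRunLoop.eq_def]

theorem pvRunLoop_false (ds : List Bool) : pvRunLoop (false :: ds) = pvRunLoop ds := by
  rw [pvRunLoop.eq_def]; simp [PySem.Int.floordiv]

theorem pvRunLoop_true_nil : pvRunLoop [true] = 1 := by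
  rw [pvRunLoop.eq_def]; simp [pvRunLoop_nil, PySem.Int.floordiv]

theorem pvRunLoop_true_false (ds : List Bool) :
    pvRunLoop (true :: false :: ds) = 1 + pvRunLoop ds := by
  rw [pvRunLoop.eq_def]; simp [PySem.Int.floordiv]

theorem pvRunLoop_true_true (ds : List Bool) :
    pvRunLoop (true :: true :: ds) = 1 + pvRunLoop ds := by
  rw [pvRunLoop.eq_def]
  cases ds with
  | nil => simp [pvRunLoop_nil, PySem.Int.floordiv]
  | cons d rest =>
    conv_rhs => rw [pvRunLoop.eq_def]
    simp only [List.takeWhile, List.length_cons, List.drop]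
    cases d with
    | false =>
      simp [PySem.Int.floordiv]
    | true =>
      simp only [List.length_cons]
      rw [PySem.Int.floordiv_eq_ediv_of_pos (by omega), PySem.Int.floordiv_eq_ediv_of_pos (by omega)]
      generalize pvRunLoop (List.drop ((List.takeWhile (fun b => b) rest).length + 1) rest) = x
      generalize ((List.takeWhile (fun b => b) rest).length : Int) = m
      omega

-- The descent-flag list of a :: b :: rest.
theorem descents_cons (a b : Int) (rest : List Int) :
    (((a :: b :: rest).zip ((a :: b :: rest).drop 1)).map (fun p => decide (p.1 > p.2)))
      = decide (a > b) :: (((b :: rest).zip ((b :: rest).drop 1)).map (fun p => decide (p.1 > p.2))) := by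
  simp [List.zip]

-- Bridge: pvGoB equals pvRunLoop over the descent flags.
theorem goB_runs (l : List Int) :
    pvGoB l = pvRunLoop ((l.zip (l.drop 1)).map (fun p => decide (p.1 > p.2))) := by
  induction l using pvGoB.induct with
  | case1 a b rest hab ih =>
    rw [descents_cons, pvGoB, if_pos hab, ih, decide_eq_true hab]
    cases rest with
    | nil => simp [pvRunLoop_true_nil, pvRunLoop_nil]
    | cons c r' =>
      rw [descents_cons]
      by_cases hbc : b > c
      · rw [decide_eq_true hbc, pvRunLoop_true_true]
      · rw [decide_eq_false hbc, pvRunLoop_true_false]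
  | case2 a b rest hab ih =>
    rw [descents_cons, pvGoB, if_neg hab, ih, decide_eq_false hab, pvRunLoop_false]
  | case3 l h =>
    match l, h with
    | [], _ => simp [pvGoB, pvRunLoop_nil]
    | [a], _ => simp [pvGoB, pvRunLoop_nil]
    | a :: b :: r, h => exact absurd rfl (h a b r)

-- ===== VERDICT (by name: the statement is the Claim_ definition above) =====
theorem maxBalancedShipments_spec : Claim_equal_maxBalancedShipments := by
  intro weight _
  unfold Spec_maxBalancedShipments maxBalancedShipments maxBalancedShipments_alt
  rw [← goB_runs]
  simpa using (pvLoopA_goB weight 0).1
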